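-- pv_equiv track=rewrite | github.com/mStegall/advent21 | 22/2.py | squareSegments
-- ===== SOURCE A (Python) =====
-- def lineSegments(r1,r2):
--     if r2[0] < r1[0]:
--         if r2[1] < r1[0]:
--             return [r1],[]
--         if r2[1] == r1[0] and r1[0] < r1[1]:
--                 return [(r1[0]+1, r1[1])],[(r1[0],r1[0])]
--
--     if r2[0] == r1[0] and r2[1] < r1[1]:
--             return [(r2[1]+1,r1[1])],[(r1[0],r2[1])]
--
--     if r2[0]==r1[1]:
--         if r1[0] == r1[1]:
--             return [], [r1]
--         else:
--             return [(r1[0],r1[1]-1)],[(r1[1],r1[1])]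
--
--     if r2[0]<=r1[0] and r1[1]<=r2[1]:
--         return [], [r1]
--     if r2[0]<=r1[0] and r1[0]<r2[1]<r1[1]:
--         return [(r2[1]+1,r1[1])], [(r1[0],r2[1])]
--
--     # Middle Case
--     if r1[0]<r2[0] and r2[1]<r1[1]:
--         return [(r1[0],r2[0]-1),(r2[1]+1,r1[1])], [r2]
--
--     # extends to the right
--     if r1[0]<r2[0]<r1[1] and r1[1] <= r2[1]:
--         return [(r1[0],r2[0]-1)], [(r2[0],r1[1])]
--
--     return [r1],[]
--
-- def squareSegments(s1,s2):
--     (x1,y1) = s1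
--     (x2,y2) = s2
--
--     livex,deadx = lineSegments(x1, x2)
--
--     if len(deadx) == 0:
--         return [s1],[]
--
--     livey,deady = lineSegments(y1, y2)
--
--     if len(deady) == 0:
--         return [s1],[]
--
--     liveSquares = []
--     deadSquares = []
--
--     for r in livex:
--         liveSquares.append((r,y1))
--
--     for r in deadx:
--         for r2 in livey:
--             liveSquares.append((r,r2))
--         for r2 in deady:
--             deadSquares.append((r,r2))
--
--     return liveSquares, deadSquares
-- ===== SOURCE B (Python) =====
-- def squareSegments(s1, s2):
--     (x1, y1), (x2, y2) = s1, s2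
--     xlo, xhi = max(x1[0], x2[0]), min(x1[1], x2[1])
--     ylo, yhi = max(y1[0], y2[0]), min(y1[1], y2[1])
--     if xlo > xhi or ylo > yhi:
--         return [s1], []
--     live = []
--     if x1[0] < xlo:
--         live.append(((x1[0], xlo - 1), y1))
--     if xhi < x1[1]:
--         live.append(((xhi + 1, x1[1]), y1))
--     if y1[0] < ylo:
--         live.append(((xlo, xhi), (y1[0], ylo - 1)))
--     if yhi < y1[1]:
--         live.append(((xlo, xhi), (yhi + 1, y1[1])))
--     return live, [((xlo, xhi), (ylo, yhi))]
-- ===== Notes on version B (the rewrite author's own statement) =====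
-- stated objective: simpler
-- what changed: Replaces the per-axis nine-branch interval cascade plus cross-product accumulator loops with one direct 2D clip: compute the closed-form intersection box (max/min per axis) and emit the up-to-four live strips around it in a single flat pass, no helper function at all.
-- intended difference: On degenerate inputs where a coordinate interval is inverted (an empty range), A's branch cascade can fall through to a fabricated split (e.g. a 'dead' strip with inverted bounds) or miss/invent an overlap; B clips by the closed-form intersection and returns ([s1], []) when the intersection box is empty, which is the intended reading; all well-formed rectangles are unaffected. — e.g. on squareSegments(((0, 1), (0, 1)), ((1, 0), (0, 1))): A returns ([((0, 0), (0, 1))], [((1, 1), (0, 1))]), B returns ([((0, 1), (0, 1))], [])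
import Mathlib
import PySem

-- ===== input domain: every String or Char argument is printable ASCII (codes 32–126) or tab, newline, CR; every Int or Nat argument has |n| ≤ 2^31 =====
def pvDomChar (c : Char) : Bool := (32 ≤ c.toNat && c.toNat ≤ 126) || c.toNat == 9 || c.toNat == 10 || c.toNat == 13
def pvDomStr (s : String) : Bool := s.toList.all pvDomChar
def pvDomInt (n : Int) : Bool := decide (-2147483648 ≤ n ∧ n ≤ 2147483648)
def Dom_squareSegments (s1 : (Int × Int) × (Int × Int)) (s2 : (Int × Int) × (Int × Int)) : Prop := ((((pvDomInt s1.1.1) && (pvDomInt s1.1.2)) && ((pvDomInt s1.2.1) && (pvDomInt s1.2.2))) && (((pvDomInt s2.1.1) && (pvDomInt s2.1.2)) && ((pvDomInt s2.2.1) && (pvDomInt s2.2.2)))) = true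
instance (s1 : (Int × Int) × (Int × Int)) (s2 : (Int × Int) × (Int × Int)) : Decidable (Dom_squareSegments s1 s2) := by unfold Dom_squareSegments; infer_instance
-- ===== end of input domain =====

-- B replaces A's per-axis nine-branch cascade and cross-product loops with one direct 2D clip
-- (closed-form intersection box, up to four live strips); objective: simpler, same cost.
-- On inputs with an inverted (empty) coordinate interval A's cascade can fabricate or miss a split;
-- there B returns the intended clip (see D_ below).


-- ===== PORT A =====
-- literal transliteration of A's lineSegments branch cascade
def lineSegmentsA (r1 : Int × Int) (r2 : Int × Int) : (List (Int × Int)) × (List (Int × Int)) :=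
  if r2.1 < r1.1 ∧ r2.2 < r1.1 then ([r1], [])
  else if r2.1 < r1.1 ∧ r2.2 = r1.1 ∧ r1.1 < r1.2 then ([(r1.1 + 1, r1.2)], [(r1.1, r1.1)])
  else if r2.1 = r1.1 ∧ r2.2 < r1.2 then ([(r2.2 + 1, r1.2)], [(r1.1, r2.2)])
  else if r2.1 = r1.2 then
    (if r1.1 = r1.2 then ([], [r1]) else ([(r1.1, r1.2 - 1)], [(r1.2, r1.2)]))
  else if r2.1 ≤ r1.1 ∧ r1.2 ≤ r2.2 then ([], [r1])
  else if r2.1 ≤ r1.1 ∧ r1.1 < r2.2 ∧ r2.2 < r1.2 then ([(r2.2 + 1, r1.2)], [(r1.1, r2.2)])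
  else if r1.1 < r2.1 ∧ r2.2 < r1.2 then ([(r1.1, r2.1 - 1), (r2.2 + 1, r1.2)], [r2])
  else if r1.1 < r2.1 ∧ r2.1 < r1.2 ∧ r1.2 ≤ r2.2 then ([(r1.1, r2.1 - 1)], [(r2.1, r1.2)])
  else ([r1], [])

def squareSegments (s1 : (Int × Int) × (Int × Int)) (s2 : (Int × Int) × (Int × Int)) : (List ((Int × Int) × (Int × Int))) × (List ((Int × Int) × (Int × Int))) :=
  let x1 := s1.1; let y1 := s1.2
  let x2 := s2.1; let y2 := s2.2
  let lx := lineSegmentsA x1 x2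
  let livex := lx.1; let deadx := lx.2
  if deadx.length = 0 then ([s1], [])
  else
    let ly := lineSegmentsA y1 y2
    let livey := ly.1; let deady := ly.2
    if deady.length = 0 then ([s1], [])
    else
      -- for r in livex: liveSquares.append((r, y1))
      let acc1 := livex.foldl (fun acc r => acc ++ [(r, y1)]) ([] : List ((Int × Int) × (Int × Int)))
      -- for r in deadx: inner loops over livey then deady, appending to the two accumulators
      let acc2 := deadx.foldl (fun (acc : (List ((Int × Int) × (Int × Int))) × (List ((Int × Int) × (Int × Int)))) r =>
        (acc.1 ++ livey.foldl (fun a r2 => a ++ [(r, r2)]) [],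
         acc.2 ++ deady.foldl (fun a r2 => a ++ [(r, r2)]) [])) (acc1, [])
      acc2

-- ===== PORT B =====
-- one direct 2D clip: the intersection box by max/min, then the up-to-four live strips around it
def squareSegments_alt (s1 : (Int × Int) × (Int × Int)) (s2 : (Int × Int) × (Int × Int)) : (List ((Int × Int) × (Int × Int))) × (List ((Int × Int) × (Int × Int))) :=
  let x1 := s1.1; let y1 := s1.2
  let x2 := s2.1; let y2 := s2.2
  let xlo := max x1.1 x2.1; let xhi := min x1.2 x2.2
  let ylo := max y1.1 y2.1; let yhi := min y1.2 y2.2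
  if xlo > xhi ∨ ylo > yhi then ([s1], [])
  else
    ((if x1.1 < xlo then [((x1.1, xlo - 1), y1)] else []) ++
     (if xhi < x1.2 then [((xhi + 1, x1.2), y1)] else []) ++
     (if y1.1 < ylo then [((xlo, xhi), (y1.1, ylo - 1))] else []) ++
     (if yhi < y1.2 then [((xlo, xhi), (yhi + 1, y1.2))] else []),
     [((xlo, xhi), (ylo, yhi))])

-- ===== PRECONDITION & SPEC =====
-- A's cascade reports no dead part on this range pair (its two genuinely-disjoint cases)
def pvNoCutA : Int × Int → Int × Int → Prop
  | (a, b), (c, d) => (c < a ∧ d < a) ∨ (a < c ∧ b < c ∧ b ≤ d)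
-- the clip finds no intersection on this axis, or the cascade's split disagrees with the clip
def pvClipOff : Int × Int → Int × Int → Prop
  | (a, b), (c, d) =>
      min b d < max a c ∨ (a ≤ c ∧ d < c ∧ d < b) ∨ (b < a ∧ (a = c ∨ (c ≤ a ∧ a ≤ d)))

-- On degenerate inputs where a coordinate interval is inverted (an empty range), A's cascade can
-- fall through to a fabricated split (e.g. a 'dead' strip with inverted bounds) or miss/invent an
-- overlap; B clips by the closed-form intersection and returns ([s1], []) when the intersection box
-- is empty, the intended reading; all well-formed rectangles are unaffected.
def D_squareSegments (s1 : (Int × Int) × (Int × Int)) (s2 : (Int × Int) × (Int × Int)) : Prop :=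
  ¬ (pvNoCutA s1.1 s2.1 ∨ pvNoCutA s1.2 s2.2) ∧ (pvClipOff s1.1 s2.1 ∨ pvClipOff s1.2 s2.2)
instance (s1 : (Int × Int) × (Int × Int)) (s2 : (Int × Int) × (Int × Int)) : Decidable (D_squareSegments s1 s2) := by
  unfold D_squareSegments pvNoCutA pvClipOff
  rcases s1 with ⟨⟨a, b⟩, ⟨e, f⟩⟩; rcases s2 with ⟨⟨c, d⟩, ⟨g, h⟩⟩
  infer_instance

def Spec_squareSegments (s1 : (Int × Int) × (Int × Int)) (s2 : (Int × Int) × (Int × Int)) (out : (List ((Int × Int) × (Int × Int))) × (List ((Int × Int) × (Int × Int)))) : Prop := ¬ D_squareSegments s1 s2 → out = squareSegments_alt s1 s2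
instance (s1 : (Int × Int) × (Int × Int)) (s2 : (Int × Int) × (Int × Int)) (out : (List ((Int × Int) × (Int × Int))) × (List ((Int × Int) × (Int × Int)))) : Decidable (Spec_squareSegments s1 s2 out) := by unfold Spec_squareSegments; infer_instance

def pvDiffWitness_squareSegments : ((Int × Int) × (Int × Int)) × ((Int × Int) × (Int × Int)) := (((0, 1), (0, 1)), ((1, 0), (0, 1)))
def pvDiffWitnessOut_squareSegments : ((List ((Int × Int) × (Int × Int))) × (List ((Int × Int) × (Int × Int)))) × ((List ((Int × Int) × (Int × Int))) × (List ((Int × Int) × (Int × Int)))) :=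
  (([((0, 0), (0, 1))], [((1, 1), (0, 1))]), ([((0, 1), (0, 1))], []))

-- ===== CLAIM (what is proved, stated in full; the proofs are below) =====
def Claim_unchanged_squareSegments : Prop := ∀ (s1 : (Int × Int) × (Int × Int)) (s2 : (Int × Int) × (Int × Int)), Dom_squareSegments s1 s2 → Spec_squareSegments s1 s2 (squareSegments s1 s2)
def Claim_changed_squareSegments : Prop := Dom_squareSegments (pvDiffWitness_squareSegments.1) (pvDiffWitness_squareSegments.2) ∧ D_squareSegments (pvDiffWitness_squareSegments.1) (pvDiffWitness_squareSegments.2) ∧ squareSegments (pvDiffWitness_squareSegments.1) (pvDiffWitness_squareSegments.2) = pvDiffWitnessOut_squareSegments.1 ∧ squareSegments_alt (pvDiffWitness_squareSegments.1) (pvDiffWitness_squareSegments.2) = pvDiffWitnessOut_squareSegments.2 ∧ pvDiffWitnessOut_squareSegments.1 ≠ pvDiffWitnessOut_squareSegments.2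

-- ===== LEMMAS AND PROOFS =====

-- proof-side restatement of the clip on one axis
def lineClip (r1 : Int × Int) (r2 : Int × Int) : (List (Int × Int)) × (List (Int × Int)) :=
  if max r1.1 r2.1 > min r1.2 r2.2 then ([r1], [])
  else
    ((if r1.1 < max r1.1 r2.1 then [(r1.1, max r1.1 r2.1 - 1)] else []) ++
     (if min r1.2 r2.2 < r1.2 then [(min r1.2 r2.2 + 1, r1.2)] else []),
     [(max r1.1 r2.1, min r1.2 r2.2)])

-- A's two genuinely-disjoint cases are disjoint for the clip as well
theorem noCut_noMeet (r1 r2 : Int × Int) (h : pvNoCutA r1 r2) :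
    min r1.2 r2.2 < max r1.1 r2.1 := by
  obtain ⟨a, b⟩ := r1; obtain ⟨c, d⟩ := r2
  simp only [pvNoCutA] at h
  omega

-- outside pvClipOff the cascade and the clip agree on the axis
theorem lineA_eq_clip (r1 r2 : Int × Int) (h : ¬ pvClipOff r1 r2) :
    lineSegmentsA r1 r2 = lineClip r1 r2 := by
  obtain ⟨a, b⟩ := r1; obtain ⟨c, d⟩ := r2
  simp only [pvClipOff] at h
  simp only [lineSegmentsA, lineClip]
  split_ifs <;>
    first
      | rfl
      | (exfalso; omega)
      | (simp only [List.nil_append, List.append_nil, List.cons_append,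
          Prod.mk.injEq, List.cons.injEq, and_true, true_and]
         omega)

-- A's dead list on one axis is empty exactly on pvNoCutA
theorem lineA_dead_empty (r1 r2 : Int × Int) :
    (lineSegmentsA r1 r2).2 = [] ↔ pvNoCutA r1 r2 := by
  obtain ⟨a, b⟩ := r1; obtain ⟨c, d⟩ := r2
  simp only [lineSegmentsA, pvNoCutA]
  split_ifs <;> simp <;> omega

-- A's combine, fed with the clip's line results, is exactly the direct 2D clip
theorem combine_clip (x1 y1 x2 y2 : Int × Int) :
    (let lx := lineClip x1 x2
     if lx.2.length = 0 then ([((x1, y1) : (Int × Int) × (Int × Int))], ([] : List ((Int × Int) × (Int × Int))))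
     else
       let ly := lineClip y1 y2
       if ly.2.length = 0 then ([(x1, y1)], [])
       else
         let acc1 := lx.1.foldl (fun acc r => acc ++ [(r, y1)]) ([] : List ((Int × Int) × (Int × Int)))
         lx.2.foldl (fun (acc : (List ((Int × Int) × (Int × Int))) × (List ((Int × Int) × (Int × Int)))) r =>
           (acc.1 ++ ly.1.foldl (fun a r2 => a ++ [(r, r2)]) [],
            acc.2 ++ ly.2.foldl (fun a r2 => a ++ [(r, r2)]) [])) (acc1, []))
      = squareSegments_alt (x1, y1) (x2, y2) := by
  simp only [lineClip, squareSegments_alt]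
  by_cases hx : max x1.1 x2.1 > min x1.2 x2.2
  · simp [hx]
  · by_cases hy : max y1.1 y2.1 > min y1.2 y2.2
    · simp [hx, hy]
    · simp only [hx, hy, if_false, or_self]
      split_ifs <;> simp_all [List.foldl]

-- ===== VERDICT (by name: the statement is the Claim_ definition above) =====
theorem squareSegments_spec : Claim_unchanged_squareSegments := by
  unfold Claim_unchanged_squareSegments
  intro s1 s2 _ hD
  obtain ⟨x1, y1⟩ := s1
  obtain ⟨x2, y2⟩ := s2
  unfold D_squareSegments at hD
  by_cases hcut : pvNoCutA x1 x2 ∨ pvNoCutA y1 y2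
  · -- some axis has no dead part for A, and then none for the clip either: both return ([s1], [])
    have hB : squareSegments_alt (x1, y1) (x2, y2) = ([((x1, y1))], []) := by
      simp only [squareSegments_alt]
      rw [if_pos (by rcases hcut with h | h <;> [exact Or.inl (noCut_noMeet _ _ h); exact Or.inr (noCut_noMeet _ _ h)])]
    rw [hB]
    simp only [squareSegments]
    rcases hcut with h | h
    · rw [if_pos (by simp [(lineA_dead_empty x1 x2).mpr h])]
    · have hy : (lineSegmentsA y1 y2).2 = [] := (lineA_dead_empty y1 y2).mpr h
      by_cases hx0 : (lineSegmentsA x1 x2).2.length = 0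
      · rw [if_pos hx0]
      · rw [if_neg hx0, if_pos (by simp [hy])]
  · -- no axis is cut-free: from ¬D_ the cascade agrees with the clip on both axes
    have hoff : ¬ pvClipOff x1 x2 ∧ ¬ pvClipOff y1 y2 := by tauto
    have hx := lineA_eq_clip x1 x2 hoff.1
    have hy := lineA_eq_clip y1 y2 hoff.2
    show squareSegments (x1, y1) (x2, y2) = squareSegments_alt (x1, y1) (x2, y2)
    simp only [squareSegments, hx, hy]
    exact combine_clip x1 y1 x2 y2

theorem squareSegments_changed : Claim_changed_squareSegments := by
  unfold Claim_changed_squareSegments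
  exact ⟨by decide, by decide, by decide, by decide, by decide⟩
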